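-- pv_equiv track=rewrite | github.com/GBbartosz/Chinese_stock_market | functions.py | get_prev_year_quarter
-- ===== SOURCE A (Python) =====
-- def get_prev_year_quarter(year, quarter, back):
--     quarters = 4
--     prev_quarter = quarter - back
--     prev_year = year
--     while prev_quarter < 1:
--         prev_quarter += quarters
--         prev_year -= 1
--     return prev_year, prev_quarter
-- ===== SOURCE B (Python) =====
-- def get_prev_year_quarter(year, quarter, back):
--     q = quarter - back
--     if q >= 1:
--         return year, q
--     k = (-q) // 4 + 1
--     return year - k, q + 4 * k
-- ===== Notes on version B (the rewrite author's own statement) =====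
-- stated objective: simpler
-- what changed: Replaces the decrement-by-one while-loop with a closed-form computation of the number of year borrows ((-q)//4 + 1 when q < 1), eliminating iteration.
import Mathlib
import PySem

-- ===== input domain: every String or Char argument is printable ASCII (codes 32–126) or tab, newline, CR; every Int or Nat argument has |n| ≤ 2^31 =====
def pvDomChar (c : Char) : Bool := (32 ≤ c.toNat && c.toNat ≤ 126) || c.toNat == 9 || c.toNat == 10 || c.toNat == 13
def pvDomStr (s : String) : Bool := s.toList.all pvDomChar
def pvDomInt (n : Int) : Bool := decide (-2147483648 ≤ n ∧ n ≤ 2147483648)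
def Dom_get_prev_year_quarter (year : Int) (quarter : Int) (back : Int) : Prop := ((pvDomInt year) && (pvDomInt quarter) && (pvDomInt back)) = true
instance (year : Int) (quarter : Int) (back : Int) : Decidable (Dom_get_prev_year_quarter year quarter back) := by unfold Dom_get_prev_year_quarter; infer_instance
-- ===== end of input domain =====

-- B replaces the one-quarter-at-a-time while-loop with a closed-form borrow count ((-q)//4+1 when q<1); objective: simpler.
-- ===== PORT A =====
-- while prev_quarter < 1: prev_quarter += 4; prev_year -= 1
def pyqLoop (prev_year : Int) (prev_quarter : Int) : Int × Int :=
  if prev_quarter < 1 then pyqLoop (prev_year - 1) (prev_quarter + 4)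
  else (prev_year, prev_quarter)
termination_by (1 - prev_quarter).toNat
decreasing_by omega

def get_prev_year_quarter (year : Int) (quarter : Int) (back : Int) : Int × Int :=
  pyqLoop year (quarter - back)

-- ===== PORT B =====
def get_prev_year_quarter_alt (year : Int) (quarter : Int) (back : Int) : Int × Int :=
  let q := quarter - back
  if q ≥ 1 then (year, q)
  else
    let k := PySem.Int.floordiv (-q) 4 + 1
    (year - k, q + 4 * k)

-- ===== PRECONDITION & SPEC =====
def Spec_get_prev_year_quarter (year : Int) (quarter : Int) (back : Int) (out : Int × Int) : Prop := out = get_prev_year_quarter_alt year quarter back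
instance (year : Int) (quarter : Int) (back : Int) (out : Int × Int) : Decidable (Spec_get_prev_year_quarter year quarter back out) := by unfold Spec_get_prev_year_quarter; infer_instance

-- ===== CLAIM (what is proved, stated in full; the proofs are below) =====
def Claim_equal_get_prev_year_quarter : Prop := ∀ (year : Int) (quarter : Int) (back : Int), Dom_get_prev_year_quarter year quarter back → Spec_get_prev_year_quarter year quarter back (get_prev_year_quarter year quarter back)

-- ===== LEMMAS AND PROOFS =====
theorem pyqLoop_closed (y q : Int) :
    pyqLoop y q = if q ≥ 1 then (y, q) else (y - ((-q) / 4 + 1), q + 4 * ((-q) / 4 + 1)) := by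
  by_cases h1 : q ≥ 1
  · rw [pyqLoop]; simp [h1]
  · induction hn : (1 - q).toNat using Nat.strong_induction_on generalizing y q with
    | _ n ih =>
      rw [pyqLoop]
      have hlt : q < 1 := by omega
      simp only [if_pos hlt]
      by_cases h2 : q + 4 ≥ 1
      · rw [pyqLoop]
        have : ¬ q + 4 < 1 := by omega
        simp only [this, if_neg (by omega : ¬ q ≥ 1)]
        have hdiv : (-q) / 4 = 0 := by omega
        rw [hdiv]; simp
      · have := ih (1 - (q + 4)).toNat (by omega) (y - 1) (q + 4) (by omega) rfl
        rw [this]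
        simp only [if_neg (by omega : ¬ q + 4 ≥ 1), if_neg (by omega : ¬ q ≥ 1)]
        have hd : (-(q + 4)) / 4 + 1 = (-q) / 4 := by omega
        rw [show -(q+4) = -q - 4 by ring] at hd ⊢
        simp only [Prod.mk.injEq]; omega


-- ===== VERDICT (by name: the statement is the Claim_ definition above) =====
theorem get_prev_year_quarter_spec : Claim_equal_get_prev_year_quarter := by
  intro year quarter back _
  unfold Spec_get_prev_year_quarter get_prev_year_quarter get_prev_year_quarter_alt
  rw [pyqLoop_closed]
  simp only [PySem.Int.floordiv]
  split_ifs with h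
  · rfl
  · norm_num [Int.fdiv_eq_ediv]
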